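-- pv_equiv track=rewrite | github.com/aryantuntune/book_bot | booking_bot/playbook.py | _choose_reset_target
-- ===== SOURCE A (Python) =====
-- def _choose_reset_target(
--     enabled: list[str],
--     escape_tried: bool,
--     prev_menu_tried: bool,
-- ) -> str:
--     """Pure decision helper for reset_to_customer_entry. Given the list of
--     enabled button labels and the two escape-attempted flags, return the
--     name of the path the caller should take. One of:
--
--         'book_with_other_mobile' — alt-menu dead-end, click the one button
--             that exits it.
--         'book_for_others'        — already in the sub-menu, click direct.
--         'booking_services'       — at main menu, click Booking Services then
--             Book for Others.
--         'main_menu'              — at some other sub-menu, click Main Menu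
--             then replay auth_prefix.
--         'no_escape'              — dangling Yes/No bubble from a 502 during
--             'Yes' click; dismiss with 'No' and retry reset.
--         'previous_menu_escape'   — payment-pending / dead-end dialog whose
--             only enabled buttons are terminal actions + 'Previous Menu'.
--             Click 'Previous Menu' to back out and retry reset.
--         'none'                   — no path available; caller should raise.
--
--     Priority matters: nav buttons always beat escape hatches, and each
--     escape hatch is gated by its own 'tried' flag so we can never loop.
--     The 'Previous Menu' escape is the LAST resort — an earlier priority
--     would have matched if the current dialog were a real menu we can
--     navigate forward from."""
--     lower = [(b or "").lower() for b in enabled]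
--
--     def _has(needle: str) -> bool:
--         return any(needle in b for b in lower)
--
--     if _has("book with other mobile"):
--         return "book_with_other_mobile"
--     if _has("book for others"):
--         return "book_for_others"
--     if _has("booking services"):
--         return "booking_services"
--     if _has("main menu"):
--         return "main_menu"
--     if not escape_tried and _has("no"):
--         return "no_escape"
--     if not prev_menu_tried and _has("previous menu"):
--         return "previous_menu_escape"
--     return "none"
-- ===== SOURCE B (Python) =====
-- _CANDIDATES = (
--     ("book with other mobile", "book_with_other_mobile"),
--     ("book for others", "book_for_others"),
--     ("booking services", "booking_services"),
--     ("main menu", "main_menu"),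
-- )
--
--
-- def _choose_reset_target(
--     enabled: list[str],
--     escape_tried: bool,
--     prev_menu_tried: bool,
-- ) -> str:
--     # Rank-and-minimise: the flag-gated candidate table is fixed up front; each
--     # label is scored with the index of the first candidate needle it contains,
--     # and the answer is the table entry at the minimum score over all labels.
--     cands = list(_CANDIDATES)
--     if not escape_tried:
--         cands.append(("no", "no_escape"))
--     if not prev_menu_tried:
--         cands.append(("previous menu", "previous_menu_escape"))
--     best = len(cands)
--     for b in enabled:
--         low = (b or "").lower()
--         r = next((i for i, c in enumerate(cands) if c[0] in low), len(cands))
--         if r < best: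
--             best = r
--     return cands[best][1] if best < len(cands) else "none"
-- ===== Notes on version B (the rewrite author's own statement) =====
-- stated objective: alternative
-- what changed: B builds the flag-gated candidate table first, scores every label with the index of the first candidate needle it contains, and returns the table entry at the minimum score (rank-and-minimise), instead of A's priority cascade of separate any-scans gated by the flags at decision time.
import Mathlib
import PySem

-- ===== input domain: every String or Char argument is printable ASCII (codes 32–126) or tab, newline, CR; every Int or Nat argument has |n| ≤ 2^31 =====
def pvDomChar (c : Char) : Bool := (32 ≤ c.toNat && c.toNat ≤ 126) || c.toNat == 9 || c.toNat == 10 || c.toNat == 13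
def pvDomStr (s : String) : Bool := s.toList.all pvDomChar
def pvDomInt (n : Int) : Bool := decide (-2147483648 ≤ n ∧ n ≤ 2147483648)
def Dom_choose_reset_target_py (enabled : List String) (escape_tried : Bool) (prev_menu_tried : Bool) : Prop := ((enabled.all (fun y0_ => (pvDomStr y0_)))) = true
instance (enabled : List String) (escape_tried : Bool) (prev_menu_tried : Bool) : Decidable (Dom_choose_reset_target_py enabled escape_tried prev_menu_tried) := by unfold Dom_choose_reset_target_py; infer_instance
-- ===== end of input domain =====

-- B replaces A's flag-gated priority cascade of any-scans by rank-and-minimise: score each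
-- label with the index of its first matching candidate, take the minimum (objective: alternative).

-- ===== PORT A =====
-- '(b or "")' is the identity on strings (falsy string = ""), so it is ported as 'b'.
def choose_reset_target_py (enabled : List String) (escape_tried : Bool) (prev_menu_tried : Bool) : String :=
  let lower := enabled.map (fun b => PySem.Str.lower b)
  let has := fun (needle : String) => lower.any (fun b => PySem.Str.isIn needle b)
  if has "book with other mobile" then "book_with_other_mobile"
  else if has "book for others" then "book_for_others"
  else if has "booking services" then "booking_services"
  else if has "main menu" then "main_menu"
  else if !escape_tried && has "no" then "no_escape"
  else if !prev_menu_tried && has "previous menu" then "previous_menu_escape"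
  else "none"

-- ===== PORT B =====
-- the flag-gated candidate table (list(_CANDIDATES) plus the conditional appends)
def pvCands (escape_tried prev_menu_tried : Bool) : List (String × String) :=
  ([("book with other mobile", "book_with_other_mobile"),
    ("book for others", "book_for_others"),
    ("booking services", "booking_services"),
    ("main menu", "main_menu")]
   ++ (if !escape_tried then [("no", "no_escape")] else []))
   ++ (if !prev_menu_tried then [("previous menu", "previous_menu_escape")] else [])

def choose_reset_target_py_alt (enabled : List String) (escape_tried : Bool) (prev_menu_tried : Bool) : String :=
  let cands := pvCands escape_tried prev_menu_tried
  -- 'next((i for i, c in enumerate(cands) if c[0] in low), len(cands))' is List.findIdx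
  let best := enabled.foldl
    (fun best b =>
      let low := PySem.Str.lower b
      let r := cands.findIdx (fun c => PySem.Str.isIn c.1 low)
      if r < best then r else best)
    cands.length
  if best < cands.length then (cands.getD best ("", "")).2 else "none"

-- ===== PRECONDITION & SPEC =====
def Spec_choose_reset_target_py (enabled : List String) (escape_tried : Bool) (prev_menu_tried : Bool) (out : String) : Prop := out = choose_reset_target_py_alt enabled escape_tried prev_menu_tried
instance (enabled : List String) (escape_tried : Bool) (prev_menu_tried : Bool) (out : String) : Decidable (Spec_choose_reset_target_py enabled escape_tried prev_menu_tried out) := by unfold Spec_choose_reset_target_py; infer_instance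

-- ===== CLAIM (what is proved, stated in full; the proofs are below) =====
def Claim_equal_choose_reset_target_py : Prop := ∀ (enabled : List String) (escape_tried : Bool) (prev_menu_tried : Bool), Dom_choose_reset_target_py enabled escape_tried prev_menu_tried → Spec_choose_reset_target_py enabled escape_tried prev_menu_tried (choose_reset_target_py enabled escape_tried prev_menu_tried)

-- ===== LEMMAS AND PROOFS =====

-- findIdx distributes over a disjunction of predicates as a minimum
theorem pv_findIdx_or {α : Type} (p q : α → Bool) (l : List α) :
    l.findIdx (fun c => p c || q c) = min (l.findIdx p) (l.findIdx q) := by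
  induction l with
  | nil => rfl
  | cons hd tl ih =>
    by_cases hp : p hd = true <;> by_cases hq : q hd = true <;>
      simp only [List.findIdx_cons, hp, hq, Bool.or_true, Bool.or_false, cond_true,
        cond_false, ih] <;> omega

-- the min-reduction fold computes min acc (findIdx of "matched by some label")
theorem pv_fold_min (cands : List (String × String)) (enabled : List String) (acc : Nat)
    (h : acc ≤ cands.length) :
    enabled.foldl
      (fun best b =>
        let low := PySem.Str.lower b
        let r := cands.findIdx (fun c => PySem.Str.isIn c.1 low)
        if r < best then r else best)
      acc
    = min acc (cands.findIdx (fun c => enabled.any (fun b => PySem.Str.isIn c.1 (PySem.Str.lower b)))) := by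
  induction enabled generalizing acc with
  | nil =>
    simp only [List.foldl_nil, List.any_nil]
    rw [List.findIdx_eq_length.mpr (by intro x _; rfl)]
    omega
  | cons hd tl ih =>
    simp only [List.foldl_cons, List.any_cons]
    rw [ih _ (by split <;> [exact Nat.le_of_lt (Nat.lt_of_lt_of_le ‹_› h); exact h])]
    rw [show (fun c : String × String => PySem.Str.isIn c.1 (PySem.Str.lower hd) || tl.any fun b => PySem.Str.isIn c.1 (PySem.Str.lower b))
          = (fun c => (fun c : String × String => PySem.Str.isIn c.1 (PySem.Str.lower hd)) c || (fun c : String × String => tl.any fun b => PySem.Str.isIn c.1 (PySem.Str.lower b)) c) from rfl,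
        pv_findIdx_or]
    split <;> omega

-- the fold started at cands.length is exactly findIdx of "matched by some label"
theorem pv_fold_full (cands : List (String × String)) (enabled : List String) :
    enabled.foldl
      (fun best b =>
        let low := PySem.Str.lower b
        let r := cands.findIdx (fun c => PySem.Str.isIn c.1 low)
        if r < best then r else best)
      cands.length
    = cands.findIdx (fun c => enabled.any (fun b => PySem.Str.isIn c.1 (PySem.Str.lower b))) := by
  rw [pv_fold_min _ _ _ le_rfl, Nat.min_eq_right List.findIdx_le_length]

-- ===== VERDICT (by name: the statement is the Claim_ definition above) =====
set_option maxHeartbeats 1600000 in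
theorem choose_reset_target_py_spec : Claim_equal_choose_reset_target_py := by
  intro enabled escape_tried prev_menu_tried _
  unfold Spec_choose_reset_target_py choose_reset_target_py choose_reset_target_py_alt
  simp only [List.any_map, Function.comp_def]
  rw [pv_fold_full]
  cases h1 : enabled.any (fun b => PySem.Str.isIn "book with other mobile" (PySem.Str.lower b)) <;>
  cases h2 : enabled.any (fun b => PySem.Str.isIn "book for others" (PySem.Str.lower b)) <;>
  cases h3 : enabled.any (fun b => PySem.Str.isIn "booking services" (PySem.Str.lower b)) <;>
  cases h4 : enabled.any (fun b => PySem.Str.isIn "main menu" (PySem.Str.lower b)) <;>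
  cases h5 : enabled.any (fun b => PySem.Str.isIn "no" (PySem.Str.lower b)) <;>
  cases h6 : enabled.any (fun b => PySem.Str.isIn "previous menu" (PySem.Str.lower b)) <;>
  cases escape_tried <;> cases prev_menu_tried <;>
    simp only [pvCands, Bool.not_false, Bool.not_true, Bool.false_eq_true, eq_self_iff_true,
      if_true, if_false, List.cons_append, List.nil_append,
      List.findIdx_cons, List.findIdx_nil, h1, h2, h3, h4, h5, h6] <;> decide
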